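-- pv_equiv track=rewrite | github.com/Anton-Su/config3 | language.py | read_input_after
-- ===== SOURCE A (Python) =====
-- def read_input_after(text: list):
--     count_massiv = 0
--     count_slovar = 0
--     new_massiv = []
--     for i in range(len(text)):
--         count_massiv_2 = text[i].count("[") - text[i].count("]")
--         count_slovar_2 = text[i].count("{") - text[i].count("}")
--         if count_slovar == 0 and count_massiv == 0:  # свободная линия
--             new_massiv.append(text[i])
--         else:
--             new_massiv[-1] += text[i]
--         count_massiv += count_massiv_2
--         count_slovar += count_slovar_2
--     return new_massiv
-- ===== SOURCE B (Python) =====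
-- def read_input_after(text: list):
--     # pass 1: flag each line that opens a new group (both running balances zero there)
--     m = s = 0
--     flags = []
--     for line in text:
--         flags.append(m == 0 and s == 0)
--         m += line.count("[") - line.count("]")
--         s += line.count("{") - line.count("}")
--     # pass 2: walk backwards, prepending lines onto the pending group; a flagged
--     # line completes the group; reverse at the end for forward order
--     out = []
--     cur = None
--     for line, flag in zip(reversed(text), reversed(flags)):
--         cur = line if cur is None else line + cur
--         if flag:
--             out.append(cur)
--             cur = None
--     out.reverse()
--     return out
-- ===== Notes on version B (the rewrite author's own statement) =====
-- stated objective: alternative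
-- what changed: A does one forward pass mutating the last output entry in place; B splits the work into two passes: first compute a boundary flag per line from the running bracket/brace balances, then build the merged groups back-to-front by prepending each line onto the pending group and reversing at the end.
import Mathlib
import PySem

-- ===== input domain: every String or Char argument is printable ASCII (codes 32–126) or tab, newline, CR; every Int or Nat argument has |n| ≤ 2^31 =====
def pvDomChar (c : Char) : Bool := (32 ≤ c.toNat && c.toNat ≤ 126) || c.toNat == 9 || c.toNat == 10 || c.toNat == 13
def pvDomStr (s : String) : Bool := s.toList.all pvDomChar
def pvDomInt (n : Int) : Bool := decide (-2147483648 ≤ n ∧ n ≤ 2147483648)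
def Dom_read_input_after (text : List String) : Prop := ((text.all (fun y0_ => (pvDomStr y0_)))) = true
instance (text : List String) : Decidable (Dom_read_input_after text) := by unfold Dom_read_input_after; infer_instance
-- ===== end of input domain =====

-- B merges continuation lines in two passes (boundary flags, then backwards grouping) instead of
-- A's single forward pass that mutates the last output entry; same cost, different decomposition.

-- ===== PORT A =====
-- new_massiv[-1] += text[i] : replace the last element; on [] Python would raise IndexError,
-- which is unreachable (the first line is always appended, since both counters start at 0)
def pvAppendLast : List String → String → List String
  | [], _ => []
  | [x], line => [x ++ line]
  | x :: y :: xs, line => x :: pvAppendLast (y :: xs) line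

def pvAStep (st : Int × Int × List String) (line : String) : Int × Int × List String :=
  let cm2 : Int := (PySem.Str.count line "[" : Int) - (PySem.Str.count line "]" : Int)
  let cs2 : Int := (PySem.Str.count line "{" : Int) - (PySem.Str.count line "}" : Int)
  let acc := if st.2.1 = 0 ∧ st.1 = 0 then st.2.2 ++ [line] else pvAppendLast st.2.2 line
  (st.1 + cm2, st.2.1 + cs2, acc)

def read_input_after (text : List String) : List String :=
  (text.foldl pvAStep (0, 0, [])).2.2

-- ===== PORT B =====
-- pass 1 of Source B: the per-line boundary flags
def pvFlags (m s : Int) : List String → List Bool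
  | [] => []
  | line :: rest =>
      decide (m = 0 ∧ s = 0) ::
        pvFlags (m + ((PySem.Str.count line "[" : Int) - (PySem.Str.count line "]" : Int)))
                (s + ((PySem.Str.count line "{" : Int) - (PySem.Str.count line "}" : Int))) rest

-- pass 2 of Source B: backwards loop over zip(reversed(text), reversed(flags)) with state (out, cur)
def pvBStep (st : List String × Option String) (p : String × Bool) : List String × Option String :=
  let cur := match st.2 with | none => p.1 | some c => p.1 ++ c
  if p.2 then (st.1 ++ [cur], none) else (st.1, some cur)

def read_input_after_alt (text : List String) : List String :=
  ((text.reverse.zip (pvFlags 0 0 text).reverse).foldl pvBStep ([], none)).1.reverse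

-- ===== PRECONDITION & SPEC =====
def Spec_read_input_after (text : List String) (out : List String) : Prop := out = read_input_after_alt text
instance (text : List String) (out : List String) : Decidable (Spec_read_input_after text out) := by unfold Spec_read_input_after; infer_instance

-- ===== CLAIM (what is proved, stated in full; the proofs are below) =====
def Claim_equal_read_input_after : Prop := ∀ (text : List String), Dom_read_input_after text → Spec_read_input_after text (read_input_after text)

-- ===== LEMMAS AND PROOFS =====

-- abbreviations for the per-line balance deltas (proof-side only)
def pvCM (l : String) : Int := (PySem.Str.count l "[" : Int) - (PySem.Str.count l "]" : Int)
def pvCS (l : String) : Int := (PySem.Str.count l "{" : Int) - (PySem.Str.count l "}" : Int)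

-- the groups and the pending open group, as a single right-to-left recursion over the flagged lines
def pvGroups : List (String × Bool) → Option String × List String
  | [] => (none, [])
  | (l, flag) :: rest =>
      let r := pvGroups rest
      let cur := match r.1 with | none => l | some c => l ++ c
      if flag then (none, cur :: r.2) else (some cur, r.2)

theorem pvAStep_eq (m s : Int) (acc : List String) (l : String) :
    pvAStep (m, s, acc) l =
      (m + pvCM l, s + pvCS l, if s = 0 ∧ m = 0 then acc ++ [l] else pvAppendLast acc l) := rfl

theorem pvFlags_cons (m s : Int) (l : String) (rest : List String) :
    pvFlags m s (l :: rest) = decide (m = 0 ∧ s = 0) :: pvFlags (m + pvCM l) (s + pvCS l) rest := rfl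

theorem pvGroups_cons_true (l : String) (z : List (String × Bool)) :
    pvGroups ((l, true) :: z) =
      (none, (match (pvGroups z).1 with | none => l | some c => l ++ c) :: (pvGroups z).2) := rfl

theorem pvGroups_cons_false (l : String) (z : List (String × Bool)) :
    pvGroups ((l, false) :: z) =
      (some (match (pvGroups z).1 with | none => l | some c => l ++ c), (pvGroups z).2) := rfl

theorem pvFlags_length (text : List String) : ∀ m s, (pvFlags m s text).length = text.length := by
  induction text with
  | nil => intro m s; rfl
  | cons l rest ih => intro m s; simp [pvFlags, ih]

theorem pvAppendLast_eq (pre : List String) (last line : String) :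
    pvAppendLast (pre ++ [last]) line = pre ++ [last ++ line] := by
  induction pre with
  | nil => rfl
  | cons x xs ih =>
      cases xs with
      | nil => simp [pvAppendLast]
      | cons y ys => simpa [pvAppendLast] using ih

theorem pvZipReverse {α β : Type} (a : List α) : ∀ (b : List β), a.length = b.length →
    a.reverse.zip b.reverse = (a.zip b).reverse := by
  induction a with
  | nil => intro b h; simp
  | cons x xs ih =>
      intro b h
      cases b with
      | nil => simp at h
      | cons y ys =>
          have hl : xs.length = ys.length := by simpa using h
          simp only [List.reverse_cons, List.zip_cons_cons]
          rw [List.zip_append (by simpa using hl), ih ys hl]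
          simp

-- pass 2 of B computes pvGroups of the forward flagged list
theorem pvPass2_eq (z : List (String × Bool)) :
    z.reverse.foldl pvBStep ([], none) = ((pvGroups z).2.reverse, (pvGroups z).1) := by
  rw [List.foldl_reverse]
  induction z with
  | nil => rfl
  | cons p rest ih =>
      obtain ⟨l, flag⟩ := p
      rw [List.foldr_cons, ih]
      cases h : (pvGroups rest).1 <;> cases flag <;>
        simp [pvBStep, pvGroups_cons_true, pvGroups_cons_false, h]

-- the first component of pvGroups is none when the balances start at zero (first flag is true)
theorem pvGroups_fst_zero (text : List String) :
    (pvGroups (text.zip (pvFlags 0 0 text))).1 = none := by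
  cases text with
  | nil => rfl
  | cons l rest =>
      rw [pvFlags_cons]
      simp only [and_self, decide_true, List.zip_cons_cons]
      rw [pvGroups_cons_true]

-- the mutual induction: A's forward fold agrees with pvGroups, both from a zero state (left
-- conjunct) and from an open-bracket state with the partial group last in the accumulator (right)
theorem pvMainLM : ∀ (n : Nat) (text : List String), text.length ≤ n →
    (∀ acc : List String,
      (text.foldl pvAStep (0, 0, acc)).2.2 = acc ++ (pvGroups (text.zip (pvFlags 0 0 text))).2) ∧
    (∀ (m s : Int) (pre : List String) (last : String), ¬(s = 0 ∧ m = 0) →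
      (text.foldl pvAStep (m, s, pre ++ [last])).2.2 =
        pre ++ (match (pvGroups (text.zip (pvFlags m s text))).1 with
                | none => last | some c => last ++ c) :: (pvGroups (text.zip (pvFlags m s text))).2) := by
  intro n
  induction n with
  | zero =>
      intro text hlen
      have htext : text = [] := List.eq_nil_of_length_eq_zero (Nat.le_zero.mp hlen)
      subst htext
      exact ⟨fun acc => by simp [pvFlags, pvGroups], fun m s pre last h => by simp [pvFlags, pvGroups]⟩
  | succ n ih =>
      intro text hlen
      cases text with
      | nil =>
          exact ⟨fun acc => by simp [pvFlags, pvGroups], fun m s pre last h => by simp [pvFlags, pvGroups]⟩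
      | cons l rest =>
          have hr : rest.length ≤ n := by simpa using Nat.lt_succ_iff.mp (by simpa using hlen)
          constructor
          · intro acc
            rw [List.foldl_cons, pvAStep_eq, if_pos ⟨rfl, rfl⟩, pvFlags_cons]
            simp only [and_self, decide_true, zero_add, List.zip_cons_cons, pvGroups_cons_true]
            by_cases hz : pvCS l = 0 ∧ pvCM l = 0
            · obtain ⟨h1, h2⟩ := hz
              rw [h1, h2, (ih rest hr).1 (acc ++ [l]), pvGroups_fst_zero rest]
              simp
            · rw [(ih rest hr).2 (pvCM l) (pvCS l) acc l hz]
          · intro m s pre last h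
            have hflag : decide (m = 0 ∧ s = 0) = false := by
              simp only [decide_eq_false_iff_not]
              exact fun hc => h ⟨hc.2, hc.1⟩
            rw [List.foldl_cons, pvAStep_eq, if_neg h, pvAppendLast_eq, pvFlags_cons, hflag]
            simp only [List.zip_cons_cons, pvGroups_cons_false]
            by_cases hz : s + pvCS l = 0 ∧ m + pvCM l = 0
            · obtain ⟨h1, h2⟩ := hz
              rw [h1, h2, (ih rest hr).1 (pre ++ [last ++ l]), pvGroups_fst_zero rest]
              simp
            · rw [(ih rest hr).2 (m + pvCM l) (s + pvCS l) pre (last ++ l) hz]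
              cases hg : (pvGroups (rest.zip (pvFlags (m + pvCM l) (s + pvCS l) rest))).1 with
              | none => simp
              | some c => simp [String.append_assoc]

-- ===== VERDICT (by name: the statement is the Claim_ definition above) =====
theorem read_input_after_spec : Claim_equal_read_input_after := by
  intro text _
  unfold Spec_read_input_after read_input_after read_input_after_alt
  rw [pvZipReverse text (pvFlags 0 0 text) (pvFlags_length text 0 0).symm, pvPass2_eq]
  have hm := (pvMainLM text.length text le_rfl).1 []
  simpa using hm
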